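-- pv_equiv track=rewrite | github.com/coddingtonbear/dejima | src/boox_annotations_to_anki/api.py | escape
-- ===== SOURCE A (Python) =====
-- def escape(term: str):
--     replacements = {
--         '\\': '\\\\',
--         '\"': '\\"',
--         '*': '\\*',
--         '_': '\\_',
--         ':': '\\:',
--     }
--     for fr, to in replacements.items():
--         term = term.replace(fr, to)
--
--     return f'"{term}"'
-- ===== SOURCE B (Python) =====
-- def escape(term: str):
--     specials = '\\"*_:'
--     return '"' + ''.join('\\' + ch if ch in specials else ch for ch in term) + '"'
-- ===== Notes on version B (the rewrite author's own statement) =====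
-- stated objective: simpler
-- what changed: Replaces A's five sequential whole-string .replace passes driven by a dict with a single character-by-character pass that prepends a backslash to each special character and joins once.
import Mathlib
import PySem

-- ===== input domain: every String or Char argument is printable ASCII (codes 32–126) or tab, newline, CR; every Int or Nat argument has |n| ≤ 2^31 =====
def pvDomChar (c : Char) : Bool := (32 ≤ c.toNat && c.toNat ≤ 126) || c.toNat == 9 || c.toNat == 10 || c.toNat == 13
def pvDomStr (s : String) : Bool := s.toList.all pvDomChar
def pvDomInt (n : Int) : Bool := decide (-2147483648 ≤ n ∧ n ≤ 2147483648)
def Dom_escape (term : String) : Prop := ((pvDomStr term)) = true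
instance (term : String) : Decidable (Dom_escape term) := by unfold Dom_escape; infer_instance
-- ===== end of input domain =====

-- B replaces A's five sequential whole-string .replace passes with one per-character pass
-- that backslash-escapes each special character and joins once (objective: simpler).

-- ===== PORT A =====
def escape (term : String) : String :=
  let replacements : PySem.Dict String String :=
    PySem.Dict.ofList [("\\", "\\\\"), ("\"", "\\\""), ("*", "\\*"), ("_", "\\_"), (":", "\\:")]
  let term := replacements.items.foldl (fun t p => PySem.Str.replace t p.1 p.2) term
  "\"" ++ term ++ "\""

-- ===== PORT B =====
def escape_alt (term : String) : String :=
  let specials : String := "\\\"*_:"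
  "\"" ++ PySem.Str.join ""
    (term.toList.map (fun ch =>
      if PySem.Str.isIn (String.singleton ch) specials then "\\" ++ String.singleton ch
      else String.singleton ch)) ++ "\""

-- ===== PRECONDITION & SPEC =====
def Spec_escape (term : String) (out : String) : Prop := out = escape_alt term
instance (term : String) (out : String) : Decidable (Spec_escape term out) := by unfold Spec_escape; infer_instance

-- ===== CLAIM (what is proved, stated in full; the proofs are below) =====
def Claim_equal_escape : Prop := ∀ (term : String), Dom_escape term → Spec_escape term (escape term)

-- ===== LEMMAS AND PROOFS =====

-- single-char replace is a flatMap over the characters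
theorem go_single (o : Char) (new : List Char) :
    ∀ (l : List Char) (fuel : Nat) (acc : List Char), l.length ≤ fuel →
      PySem.Chars.replace.go [o] new fuel l acc
        = acc.reverse ++ l.flatMap (fun c => if c = o then new else [c]) := by
  intro l
  induction l with
  | nil =>
    intro fuel acc _
    cases fuel <;> simp [PySem.Chars.replace.go]
  | cons c t ih =>
    intro fuel acc h
    cases fuel with
    | zero => simp at h
    | succ n =>
      rw [PySem.Chars.replace.go]
      by_cases hc : c = o
      · subst hc
        simp only [List.isPrefixOf, BEq.rfl, Bool.true_and, if_true,
          List.length_singleton, List.drop_one, List.tail_cons]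
        rw [ih n _ (by simpa using h)]
        simp
      · have hp : [o].isPrefixOf (c :: t) = false := by
          simp [List.isPrefixOf]
          exact fun h' => (hc h'.symm).elim
        rw [hp]
        simp only [Bool.false_eq_true, if_false]
        rw [ih n _ (by simpa using h)]
        simp [hc]

theorem replace_single (s : List Char) (o : Char) (new : List Char) :
    PySem.Chars.replace s [o] new = s.flatMap (fun c => if c = o then new else [c]) := by
  rw [PySem.Chars.replace]
  simp only [List.isEmpty_cons, Bool.false_eq_true, if_false]
  exact go_single o new s s.length [] le_rfl

theorem flatMap_comp {α : Type} (f g : α → List α) (s : List α) :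
    (s.flatMap f).flatMap g = s.flatMap (fun c => (f c).flatMap g) := by
  induction s with
  | nil => rfl
  | cons c t ih => simp [List.flatMap_cons, ih]

theorem dict_items :
    (PySem.Dict.ofList [("\\", "\\\\"), ("\"", "\\\""), ("*", "\\*"), ("_", "\\_"), (":", "\\:")]
      : PySem.Dict String String).items
    = [("\\", "\\\\"), ("\"", "\\\""), ("*", "\\*"), ("_", "\\_"), (":", "\\:")] := by decide

theorem intercalate_nil_sep {α : Type} (l : List (List α)) : List.intercalate [] l = l.flatten := by
  induction l with
  | nil => rfl
  | cons a t ih =>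
    cases t with
    | nil => simp [List.intercalate]
    | cons b t2 =>
      simp only [List.intercalate] at ih ⊢
      rw [show List.intersperse [] (a :: b :: t2) = a :: [] :: List.intersperse [] (b :: t2) from rfl,
        List.flatten_cons, List.flatten_cons, ih]
      simp

theorem escape_spec' : ∀ (term : String), escape term = escape_alt term := by
  intro term
  rw [← String.toList_inj]
  unfold escape escape_alt
  dsimp only
  rw [dict_items]
  simp only [List.foldl_cons, List.foldl_nil]
  simp only [String.toList_append, PySem.Str.toList_join, PySem.Str.toList_replace]
  congr 1
  congr 1
  -- A side: five single-char replaces as flatMaps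
  have h1 : ("\\" : String).toList = ['\\'] := rfl
  have h2 : ("\"" : String).toList = ['"'] := rfl
  have h3 : ("*" : String).toList = ['*'] := rfl
  have h4 : ("_" : String).toList = ['_'] := rfl
  have h5 : (":" : String).toList = [':'] := rfl
  rw [h1, h2, h3, h4, h5]
  rw [replace_single, replace_single, replace_single, replace_single, replace_single,
    flatMap_comp, flatMap_comp, flatMap_comp, flatMap_comp]
  -- B side: join "" = flatten, each piece from a singleton char
  rw [List.map_map]
  have hsep : ("" : String).toList = ([] : List Char) := rfl
  rw [hsep]
  unfold PySem.Chars.join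
  rw [intercalate_nil_sep]
  rw [← List.flatMap_def]
  apply List.flatMap_congr
  intro c _
  by_cases hc1 : c = '\\'
  · subst hc1; decide
  by_cases hc2 : c = '"'
  · subst hc2; decide
  by_cases hc3 : c = '*'
  · subst hc3; decide
  by_cases hc4 : c = '_'
  · subst hc4; decide
  by_cases hc5 : c = ':'
  · subst hc5; decide
  have hin : PySem.Chars.isIn [c] ['\\', '"', '*', '_', ':'] = false := by
    rw [PySem.Chars.isIn_eq_false_iff]
    intro hinf
    have hm := hinf.sublist.subset (List.mem_singleton_self c)
    simp only [List.mem_cons, List.not_mem_nil, or_false] at hm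
    rcases hm with h | h | h | h | h
    · exact hc1 h
    · exact hc2 h
    · exact hc3 h
    · exact hc4 h
    · exact hc5 h
  simp [Function.comp, hc1, hc2, hc3, hc4, hc5, hin]

-- ===== VERDICT (by name: the statement is the Claim_ definition above) =====
set_option maxHeartbeats 1000000 in
theorem escape_spec : Claim_equal_escape := by
  intro term _
  unfold Spec_escape
  exact escape_spec' term
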